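-- pv_equiv track=rewrite | github.com/MrBrantCode/unitest_baseline | mut_generate/mist_train_cf/cf_67512/solution.py | find_singleton_position
-- ===== SOURCE A (Python) =====
-- def find_singleton_position(arr):
--     """
--     Returns the numerical position of the first singleton element in the array.
--
--     Args:
--         arr (list): A list of integers.
--
--     Returns:
--         int: The 0-based position of the first singleton element, or -1 if no singleton exists.
--     """
--     frequency = {}
--
--     # Count the frequency of each number in the array
--     for num in arr:
--         if num in frequency:
--             frequency[num] += 1
--         else:
--             frequency[num] = 1
--
--     # Find the first singleton element and return its position
--     for i, num in enumerate(arr):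
--         if frequency[num] == 1:
--             return i
--
--     # Return -1 if no singleton element is found
--     return -1
-- ===== SOURCE B (Python) =====
-- def find_singleton_position(arr):
--     """
--     Returns the numerical position of the first singleton element in the array.
--
--     One pass builds value -> [count, first_index]; then a min-reduction over the
--     table picks the smallest first_index among count-1 entries (-1 if none).
--     """
--     info = {}
--     for i, num in enumerate(arr):
--         entry = info.get(num)
--         if entry is None:
--             info[num] = [1, i]
--         else:
--             entry[0] += 1
--     best = -1
--     for count, first in info.values():
--         if count == 1 and (best == -1 or first < best):
--             best = first
--     return best
-- ===== Notes on version B (the rewrite author's own statement) =====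
-- stated objective: alternative
-- what changed: B builds a single dict value->(count, first_index) in one pass and then takes a min-reduction over the dict's values (smallest first_index with count==1), instead of A's separate count dict followed by a left-to-right rescan of the array.
import Mathlib
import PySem

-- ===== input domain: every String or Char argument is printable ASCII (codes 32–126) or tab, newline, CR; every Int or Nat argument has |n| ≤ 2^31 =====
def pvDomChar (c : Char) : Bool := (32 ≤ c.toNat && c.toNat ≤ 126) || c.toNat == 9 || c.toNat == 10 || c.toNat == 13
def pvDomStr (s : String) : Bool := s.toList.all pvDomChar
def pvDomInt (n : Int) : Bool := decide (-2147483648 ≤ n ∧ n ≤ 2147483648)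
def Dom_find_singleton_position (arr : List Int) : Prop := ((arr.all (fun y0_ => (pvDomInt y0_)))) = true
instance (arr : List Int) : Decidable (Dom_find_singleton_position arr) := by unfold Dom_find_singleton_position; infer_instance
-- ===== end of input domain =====

-- B replaces A's left-to-right array rescan by a min-reduction over a value -> (count, first_index) table built in one pass (alternative decomposition, same cost).

-- ===== PORT A =====
def aScan (freq : PySem.Dict Int Int) : List (Int × Int) → Int
  | [] => -1
  | (i, num) :: rest => if freq.getD num 0 = 1 then i else aScan freq rest

def find_singleton_position (arr : List Int) : Int :=
  let frequency := arr.foldl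
    (fun d num => if d.contains num then d.modify num 0 (· + 1) else d.insert num 1)
    PySem.Dict.empty
  aScan frequency (PySem.List.enumerate arr)

-- ===== PORT B =====
def bStep (d : PySem.Dict Int (Int × Int)) (p : Int × Int) : PySem.Dict Int (Int × Int) :=
  match d.get? p.2 with
  | none => d.insert p.2 (1, p.1)
  | some e => d.insert p.2 (e.1 + 1, e.2)

def bMinLoop : List (Int × Int) → Int → Int
  | [], best => best
  | (count, first) :: rest, best =>
      bMinLoop rest (if count = 1 ∧ (best = -1 ∨ first < best) then first else best)

def find_singleton_position_alt (arr : List Int) : Int :=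
  let info := (PySem.List.enumerate arr).foldl bStep PySem.Dict.empty
  bMinLoop info.values (-1)

-- ===== PRECONDITION & SPEC =====
def Spec_find_singleton_position (arr : List Int) (out : Int) : Prop := out = find_singleton_position_alt arr
instance (arr : List Int) (out : Int) : Decidable (Spec_find_singleton_position arr out) := by unfold Spec_find_singleton_position; infer_instance

-- ===== CLAIM (what is proved, stated in full; the proofs are below) =====
def Claim_equal_find_singleton_position : Prop := ∀ (arr : List Int), Dom_find_singleton_position arr → Spec_find_singleton_position arr (find_singleton_position arr)

-- ===== LEMMAS AND PROOFS =====

-- A's frequency dict counts occurrences.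
theorem freq_getD (xs : List Int) (d : PySem.Dict Int Int) (v : Int) :
    (xs.foldl (fun d num => if d.contains num then d.modify num 0 (· + 1) else d.insert num 1) d).getD v 0
      = d.getD v 0 + (xs.count v : Int) := by
  induction xs generalizing d with
  | nil => simp
  | cons x r ih =>
      simp only [List.foldl_cons, ih, List.count_cons]
      by_cases hc : d.contains x = true
      · rw [if_pos hc, PySem.Dict.getD_modify]
        rcases eq_or_ne v x with rfl | hne
        · simp; ring
        · simp [hne, hne.symm]
      · simp only [Bool.not_eq_true] at hc
        rw [if_neg (by simp [hc]), PySem.Dict.getD_insert]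
        rcases eq_or_ne v x with rfl | hne
        · rw [PySem.Dict.getD_of_not_contains (h := hc)]; simp; ring
        · simp [hne, hne.symm]

theorem bStep_getD (d : PySem.Dict Int (Int × Int)) (p : Int × Int) (w : Int) :
    (bStep d p).getD w (0,0) =
      if w = p.2 then
        (match d.get? p.2 with
          | none => ((1 : Int), p.1)
          | some e => (e.1 + 1, e.2))
      else d.getD w (0,0) := by
  unfold bStep
  rcases hg : d.get? p.2 with _ | e <;> simp only <;> rw [PySem.Dict.getD_insert]

theorem bStep_contains (d : PySem.Dict Int (Int × Int)) (p : Int × Int) (w : Int) :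
    (bStep d p).contains w = (w == p.2 || d.contains w) := by
  unfold bStep
  rcases hg : d.get? p.2 with _ | e <;> simp only <;> rw [PySem.Dict.contains_insert]

-- B's table keeps its keys in first-appearance order.
theorem build_keys (xs : List Int) (s : Int) (d : PySem.Dict Int (Int × Int)) :
    ((PySem.List.enumerate xs s).foldl bStep d).keys = PySem.Set.update d.keys xs := by
  induction xs generalizing s d with
  | nil => simp [PySem.List.enumerate_nil, PySem.Set.update_nil]
  | cons x r ih =>
      rw [PySem.List.enumerate_cons, List.foldl_cons, ih, PySem.Set.update_cons]
      congr 1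
      show (bStep d (s, x)).keys = PySem.Set.add d.keys x
      unfold bStep
      rcases hg : d.get? x with _ | e <;> simp only
      · rw [PySem.Dict.keys_insert_of_not_contains, PySem.Set.add_of_not_mem]
        · rw [← PySem.Dict.contains_iff_mem_keys]
          simp [PySem.Dict.contains_eq_isSome_get?, hg]
        · simp [PySem.Dict.contains_eq_isSome_get?, hg]
      · rw [PySem.Dict.keys_insert_of_contains, PySem.Set.add_of_mem]
        · rw [← PySem.Dict.contains_iff_mem_keys]
          simp [PySem.Dict.contains_eq_isSome_get?, hg]
        · simp [PySem.Dict.contains_eq_isSome_get?, hg]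

-- B's table stores (count, first index) per value.
theorem build_getD (xs : List Int) (s : Int) (d : PySem.Dict Int (Int × Int)) (v : Int) :
    ((PySem.List.enumerate xs s).foldl bStep d).getD v (0,0) =
      if d.contains v = true then ((d.getD v (0,0)).1 + (xs.count v : Int), (d.getD v (0,0)).2)
      else if v ∈ xs then ((xs.count v : Int), s + (xs.idxOf v : Int))
      else (0, 0) := by
  induction xs generalizing s d with
  | nil =>
      simp only [PySem.List.enumerate_nil, List.foldl_nil, List.count_nil, List.not_mem_nil,
        if_false, Nat.cast_zero, add_zero]
      by_cases hc : d.contains v = true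
      · simp [hc]
      · simp only [Bool.not_eq_true] at hc
        simp [hc, PySem.Dict.getD_of_not_contains (h := hc)]
  | cons x r ih =>
      rw [PySem.List.enumerate_cons, List.foldl_cons, ih]
      rcases eq_or_ne v x with rfl | hne
      · rw [bStep_contains, bStep_getD]
        simp only [BEq.rfl, Bool.true_or, if_true, List.count_cons_self,
          List.mem_cons, true_or, List.idxOf_cons_self]
        by_cases hc : d.contains v = true
        · rcases hg : d.get? v with _ | e
          · exfalso
            rw [PySem.Dict.contains_eq_isSome_get?, hg] at hc; simp at hc
          · simp only
            rw [PySem.Dict.getD_of_get?_eq_some (h := hg)]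
            simp only [hc, if_true, Prod.mk.injEq]
            refine ⟨by omega, trivial⟩
        · simp only [Bool.not_eq_true] at hc
          rw [PySem.Dict.contains_eq_isSome_get?] at hc
          rcases hg : d.get? v with _ | e
          · simp only
            simp [PySem.Dict.contains_eq_isSome_get?, hg]
            omega
          · rw [hg] at hc; simp at hc
      · rw [bStep_contains, bStep_getD, if_neg hne]
        have hbe : (v == x) = false := by simp [hne]
        rw [hbe, Bool.false_or]
        have hcount : ((x :: r).count v : Int) = (r.count v : Int) := by
          simp [hne.symm]
        by_cases hc : d.contains v = true
        · simp [hc, hcount]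
        · simp only [Bool.not_eq_true] at hc
          simp only [hc]
          by_cases hm : v ∈ r
          · rw [if_pos hm, if_pos (List.mem_cons_of_mem _ hm)]
            rw [List.idxOf_cons_ne _ (by exact fun h => hne h.symm)]
            simp only [Bool.false_eq_true, if_false, Prod.mk.injEq]
            refine ⟨hcount.symm, ?_⟩
            push_cast; ring
          · rw [if_neg hm]
            simp [List.mem_cons, hne, hm]

-- The rescan of A, abstracted to a predicate on the value.
def firstQ (q : Int → Bool) : List Int → Int → Int
  | [], _ => -1
  | x :: r, s => if q x then s else firstQ q r (s + 1)

theorem aScan_eq_firstQ (freq : PySem.Dict Int Int) (q : Int → Bool)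
    (hq : ∀ v, (freq.getD v 0 = 1) = (q v = true)) :
    ∀ (xs : List Int) (s : Int), aScan freq (PySem.List.enumerate xs s) = firstQ q xs s := by
  intro xs
  induction xs with
  | nil => intro s; simp [PySem.List.enumerate_nil, aScan, firstQ]
  | cons x r ih =>
      intro s
      rw [PySem.List.enumerate_cons]
      show (if freq.getD x 0 = 1 then s else aScan freq (PySem.List.enumerate r (s+1)))
        = (if q x then s else firstQ q r (s+1))
      rw [ih]
      by_cases hx : q x = true
      · rw [if_pos (by rw [hq x]; exact hx), if_pos hx]
      · rw [if_neg (by rw [hq x]; exact hx), if_neg (by simpa using hx)]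

theorem firstQ_eq_find? (q : Int → Bool) :
    ∀ (xs : List Int) (s : Int),
      firstQ q xs s = match xs.find? q with
        | some x => s + (xs.idxOf x : Int)
        | none => -1 := by
  intro xs
  induction xs with
  | nil => intro s; rfl
  | cons x r ih =>
      intro s
      by_cases hx : q x = true
      · simp [firstQ, hx, List.find?_cons_of_pos hx]
      · have hx' : q x = false := by simpa using hx
        rw [show firstQ q (x :: r) s = firstQ q r (s+1) by simp [firstQ, hx'], ih,
          List.find?_cons_of_neg (by simp [hx'])]
        rcases hf : r.find? q with _ | y
        · rfl
        · simp only
          have hy : q y = true := List.find?_some hf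
          have hne : y ≠ x := fun h => by rw [h, hx'] at hy; cases hy
          rw [List.idxOf_cons_ne _ (fun h => hne h.symm)]
          push_cast; ring

-- find? returns the q-element with minimal first-occurrence index.
theorem find?_idxOf_min (q : Int → Bool) :
    ∀ (xs : List Int) (x₀ : Int), xs.find? q = some x₀ →
      ∀ v ∈ xs, q v = true → xs.idxOf x₀ ≤ xs.idxOf v := by
  intro xs
  induction xs with
  | nil => intro x₀ h; cases h
  | cons x r ih =>
      intro x₀ h v hv hqv
      by_cases hx : q x = true
      · rw [List.find?_cons_of_pos hx] at h
        cases h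
        simp
      · have hx' : q x = false := by simpa using hx
        rw [List.find?_cons_of_neg (by simp [hx'])] at h
        have hqx₀ : q x₀ = true := List.find?_some h
        have hne₀ : x₀ ≠ x := fun hh => by rw [hh, hx'] at hqx₀; cases hqx₀
        have hnev : v ≠ x := fun hh => by rw [hh, hx'] at hqv; cases hqv
        have hvr : v ∈ r := by
          rcases List.mem_cons.mp hv with rfl | h'
          · exact absurd rfl hnev
          · exact h'
        rw [List.idxOf_cons_ne _ (fun h => hne₀ h.symm),
          List.idxOf_cons_ne _ (fun h => hnev h.symm)]
        exact Nat.succ_le_succ (ih x₀ h v hvr hqv)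

-- first-appearance order = increasing first-occurrence index.
theorem pairwise_idxOf_ofList :
    ∀ (xs : List Int), (PySem.Set.ofList xs).Pairwise (fun a b => xs.idxOf a < xs.idxOf b) := by
  intro xs
  induction xs with
  | nil => simp [PySem.Set.ofList_nil]
  | cons x r ih =>
      rw [PySem.Set.ofList_cons]
      constructor
      · intro b hb
        have hbr : b ∈ PySem.Set.ofList r ∧ b ≠ x := (PySem.Set.mem_discard _ _ _).mp hb
        rw [List.idxOf_cons_self, List.idxOf_cons_ne _ (fun h => hbr.2 h.symm)]
        exact Nat.succ_pos _
      · have hsub : List.Sublist (PySem.Set.discard (PySem.Set.ofList r) x) (PySem.Set.ofList r) := by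
          rw [PySem.Set.discard]
          exact List.filter_sublist
        have h2 := ih.sublist hsub
        refine h2.imp_of_mem ?_
        intro a b ha hb hab
        have hax : a ≠ x := ((PySem.Set.mem_discard _ _ _).mp ha).2
        have hbx : b ≠ x := ((PySem.Set.mem_discard _ _ _).mp hb).2
        rw [List.idxOf_cons_ne _ (fun h => hax h.symm), List.idxOf_cons_ne _ (fun h => hbx h.symm)]
        omega

theorem bMinLoop_append (V1 V2 : List (Int × Int)) (b : Int) :
    bMinLoop (V1 ++ V2) b = bMinLoop V2 (bMinLoop V1 b) := by
  induction V1 generalizing b with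
  | nil => rfl
  | cons p r ih => rw [List.cons_append]; exact ih _

theorem bMinLoop_no_qual (V : List (Int × Int)) (b : Int)
    (h : ∀ p ∈ V, p.1 ≠ 1) : bMinLoop V b = b := by
  induction V generalizing b with
  | nil => rfl
  | cons p r ih =>
      obtain ⟨c, f⟩ := p
      have hc : c ≠ 1 := h (c, f) List.mem_cons_self
      show bMinLoop r (if c = 1 ∧ _ then f else b) = b
      rw [if_neg (fun hh => hc hh.1)]
      exact ih b (fun p hp => h p (List.mem_cons_of_mem _ hp))

theorem bMinLoop_found (V : List (Int × Int)) (b : Int)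
    (hb : 0 ≤ b) (h : ∀ p ∈ V, b < p.2) : bMinLoop V b = b := by
  induction V with
  | nil => rfl
  | cons p r ih =>
      obtain ⟨c, f⟩ := p
      have hf : b < f := h (c, f) List.mem_cons_self
      show bMinLoop r (if c = 1 ∧ (b = -1 ∨ f < b) then f else b) = b
      rw [if_neg (by rintro ⟨-, h1 | h2⟩ <;> omega)]
      exact ih (fun p hp => h p (List.mem_cons_of_mem _ hp))

theorem dropWhile_head_false (p : Int → Bool) :
    ∀ (l : List Int) (a : Int) (t : List Int), l.dropWhile p = a :: t → p a = false := by
  intro l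
  induction l with
  | nil => intro a t h; cases h
  | cons y r ih =>
      intro a t h
      rw [List.dropWhile_cons] at h
      by_cases hy : p y = true
      · rw [if_pos hy] at h; exact ih a t h
      · rw [if_neg hy] at h
        cases h
        simpa using hy

theorem main_eq (arr : List Int) :
    find_singleton_position arr = find_singleton_position_alt arr := by
  classical
  let q : Int → Bool := fun x => decide (arr.count x = 1)
  let f : Int → Int × Int := fun v => ((arr.count v : Int), (arr.idxOf v : Int))
  -- A side
  have hA : find_singleton_position arr = firstQ q arr 0 := by
    show aScan _ (PySem.List.enumerate arr) = _
    exact aScan_eq_firstQ _ q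
      (fun v => by
        rw [freq_getD]
        simp [q]) arr 0
  -- B side values list
  have hkeys : ((PySem.List.enumerate arr).foldl bStep PySem.Dict.empty).keys
      = PySem.Set.ofList arr := by
    rw [build_keys, PySem.Dict.keys_empty, PySem.Set.update_nil_left]
  have hB : find_singleton_position_alt arr
      = bMinLoop ((PySem.Set.ofList arr).map f) (-1) := by
    show bMinLoop (((PySem.List.enumerate arr).foldl bStep PySem.Dict.empty).values) (-1) = _
    rw [PySem.Dict.values_eq_map_keys _ (by rw [hkeys]; exact PySem.Set.nodup_ofList _) (0,0), hkeys]
    congr 1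
    refine List.map_congr_left ?_
    intro v hv
    have hvarr : v ∈ arr := (PySem.Set.mem_ofList _ _).mp hv
    rw [build_getD, if_neg (by simp [PySem.Dict.contains_empty]), if_pos hvarr]
    simp [f]
  rw [hA, hB, firstQ_eq_find? q arr 0]
  rcases hfind : arr.find? q with _ | x₀
  · -- no singleton
    simp only
    rw [bMinLoop_no_qual]
    intro p hp
    obtain ⟨v, hv, rfl⟩ := List.mem_map.mp hp
    have hvarr : v ∈ arr := (PySem.Set.mem_ofList _ _).mp hv
    have := List.find?_eq_none.mp hfind v hvarr
    simp only [q, decide_eq_true_eq] at this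
    simp only [f]
    intro hcast
    exact this (by exact_mod_cast hcast)
  · -- there is a singleton
    simp only [zero_add]
    symm
    have hqx₀ : q x₀ = true := List.find?_some hfind
    have hx₀arr : x₀ ∈ arr := List.mem_of_find?_eq_some hfind
    have hx₀S : x₀ ∈ PySem.Set.ofList arr := (PySem.Set.mem_ofList _ _).mpr hx₀arr
    set S := PySem.Set.ofList arr with hSdef
    set W := S.takeWhile (fun v => !q v) with hWdef
    set T := S.dropWhile (fun v => !q v) with hTdef
    have hWT : W ++ T = S := List.takeWhile_append_dropWhile
    rcases hT : T with _ | ⟨x₁, T'⟩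
    · exfalso
      rw [hT, List.append_nil] at hWT
      have : x₀ ∈ W := hWT ▸ hx₀S
      have := List.mem_takeWhile_imp this
      rw [hqx₀] at this
      simp at this
    · have hqx₁ : q x₁ = true := by
        have := dropWhile_head_false (fun v => !q v) S x₁ T' (by rw [← hTdef, hT])
        simpa using this
      have hx₁S : x₁ ∈ S := by rw [← hWT, hT]; exact List.mem_append_right _ List.mem_cons_self
      have hx₁arr : x₁ ∈ arr := (PySem.Set.mem_ofList _ _).mp hx₁S
      have hcount₁ : arr.count x₁ = 1 := by simpa [q] using hqx₁
      have hpw : S.Pairwise (fun a b => arr.idxOf a < arr.idxOf b) := pairwise_idxOf_ofList arr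
      have hpw' : (x₁ :: T').Pairwise (fun a b => arr.idxOf a < arr.idxOf b) := by
        refine List.Pairwise.sublist ?_ hpw
        rw [← hWT, hT]
        exact List.sublist_append_right _ _
      have hlt : ∀ v ∈ T', arr.idxOf x₁ < arr.idxOf v :=
        fun v hv => List.rel_of_pairwise_cons hpw' hv
      -- compute the B loop
      have hSsplit : S.map f = W.map f ++ f x₁ :: T'.map f := by
        rw [← hWT, hT, List.map_append, List.map_cons]
      rw [hSsplit, bMinLoop_append, bMinLoop_no_qual (W.map f) (-1) ?hW]
      case hW =>
        intro p hp
        obtain ⟨v, hv, rfl⟩ := List.mem_map.mp hp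
        have := List.mem_takeWhile_imp (hWdef ▸ hv)
        simp only [q, Bool.not_eq_true', decide_eq_false_iff_not] at this
        simp only [f]
        intro hcast
        exact this (by exact_mod_cast hcast)
      have hfx : f x₁ = ((arr.count x₁ : Int), (arr.idxOf x₁ : Int)) := rfl
      rw [hfx]
      show bMinLoop (T'.map f)
          (if (arr.count x₁ : Int) = 1 ∧ ((-1 : Int) = -1 ∨ (arr.idxOf x₁ : Int) < -1)
            then (arr.idxOf x₁ : Int) else -1)
        = (arr.idxOf x₀ : Int)
      rw [if_pos ⟨by exact_mod_cast hcount₁, Or.inl rfl⟩]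
      rw [bMinLoop_found (T'.map f) (arr.idxOf x₁ : Int) (Int.natCast_nonneg _) ?hT']
      case hT' =>
        intro p hp
        obtain ⟨v, hv, rfl⟩ := List.mem_map.mp hp
        have := hlt v hv
        simp only [f]
        exact_mod_cast this
      -- idxOf x₁ = idxOf x₀
      have h1 : arr.idxOf x₀ ≤ arr.idxOf x₁ := find?_idxOf_min q arr x₀ hfind x₁ hx₁arr hqx₁
      have h2 : arr.idxOf x₁ ≤ arr.idxOf x₀ := by
        have hx₀WT : x₀ ∈ W ++ x₁ :: T' := by rw [← hT, hWT]; exact hx₀S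
        rcases List.mem_append.mp hx₀WT with hW | hC
        · exfalso
          have := List.mem_takeWhile_imp hW
          rw [hqx₀] at this
          simp at this
        · rcases List.mem_cons.mp hC with rfl | hT'
          · exact le_refl _
          · exact Nat.le_of_lt (hlt _ hT')
      have heq : arr.idxOf x₁ = arr.idxOf x₀ := Nat.le_antisymm h2 h1
      exact_mod_cast heq

-- ===== VERDICT (by name: the statement is the Claim_ definition above) =====
theorem find_singleton_position_spec : Claim_equal_find_singleton_position := by
  intro arr _
  unfold Spec_find_singleton_position
  exact main_eq arr
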